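-- pv_equiv track=rewrite | github.com/jurajstrecha/AdventOfCode2018 | day02/Checksum.py | get_pair_and_triplet_found_flags
-- ===== SOURCE A (Python) =====
-- def get_pair_and_triplet_found_flags(sorted_letters):
-- 	pair = False
-- 	triplet = False
--
-- 	occurrences = 0
-- 	last_letter = ''
--
-- 	for letter in sorted_letters:
-- 		if letter == last_letter:
-- 			occurrences = occurrences + 1
-- 		else:
-- 			if occurrences == 2:
-- 				pair = True
-- 			elif occurrences == 3:
-- 				triplet = True
--
-- 			if pair and triplet:
-- 				return pair, triplet
--
-- 			occurrences = 1
--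
-- 		last_letter = letter
--
-- 	if occurrences == 2:
-- 		pair = True
-- 	elif occurrences == 3:
-- 		triplet = True
--
-- 	return pair, triplet
-- ===== SOURCE B (Python) =====
-- def get_pair_and_triplet_found_flags(sorted_letters):
--     # Stateless sliding-window detection: pad with None sentinels; a window
--     # witnesses a maximal consecutive run of length exactly 2 (resp. 3)
--     # starting at its second position. No counter, no flags, no early return.
--     ext = [None] + list(sorted_letters) + [None]
--     pair = any(a != b and b == c and c != d
--                for a, b, c, d in zip(ext, ext[1:], ext[2:], ext[3:]))
--     triplet = any(a != b and b == c == d and d != e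
--                   for a, b, c, d, e in zip(ext, ext[1:], ext[2:], ext[3:], ext[4:]))
--     return pair, triplet
-- ===== Notes on version B (the rewrite author's own statement) =====
-- stated objective: alternative
-- what changed: Replaces A's stateful run-counting scan (occurrence counter, inline pair/triplet flags, early return) by a stateless sliding-window test over a sentinel-padded copy of the list: zip of four (five) shifted copies, and a window detects a maximal consecutive run of length exactly 2 (resp. 3) starting at its second position.
import Mathlib
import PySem

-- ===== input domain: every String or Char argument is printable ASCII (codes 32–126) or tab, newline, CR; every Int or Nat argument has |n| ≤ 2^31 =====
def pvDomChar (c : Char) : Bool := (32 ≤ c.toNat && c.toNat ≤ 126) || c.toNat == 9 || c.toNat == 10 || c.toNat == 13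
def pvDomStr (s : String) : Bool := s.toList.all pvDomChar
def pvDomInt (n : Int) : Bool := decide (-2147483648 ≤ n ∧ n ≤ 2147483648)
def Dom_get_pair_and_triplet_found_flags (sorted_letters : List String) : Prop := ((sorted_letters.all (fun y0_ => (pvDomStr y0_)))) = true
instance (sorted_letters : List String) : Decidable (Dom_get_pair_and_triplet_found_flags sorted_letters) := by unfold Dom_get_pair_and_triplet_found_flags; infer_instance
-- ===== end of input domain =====

-- B replaces A's stateful run-counting scan by a stateless sliding-window test
-- over a sentinel-padded copy of the input; same O(n) cost (objective: alternative).

-- ===== PORT A =====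
-- Literal port of A's loop: state = (pair, triplet, occurrences, last_letter);
-- the mid-loop 'return pair, triplet' is the early exit in the else branch.
def pvALoop : List String → Bool → Bool → Int → String → Bool × Bool
  | [], pair, triplet, occurrences, _ =>
    if occurrences == 2 then (true, triplet)
    else if occurrences == 3 then (pair, true)
    else (pair, triplet)
  | letter :: rest, pair, triplet, occurrences, last_letter =>
    if letter == last_letter then
      pvALoop rest pair triplet (occurrences + 1) letter
    else
      let pair := if occurrences == 2 then true else pair
      let triplet := if occurrences == 2 then triplet else if occurrences == 3 then true else triplet
      if pair && triplet then (pair, triplet)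
      else pvALoop rest pair triplet 1 letter

def get_pair_and_triplet_found_flags (sorted_letters : List String) : Bool × Bool :=
  pvALoop sorted_letters false false 0 ""

-- ===== PORT B =====
-- Source B: ext = [None] + list(s) + [None]; any(a != b and b == c and c != d for
-- a,b,c,d in zip(ext, ext[1:], ext[2:], ext[3:])).  The zip of the shifted
-- copies enumerates exactly the length-4 (length-5) sliding windows of ext,
-- which is what these recursions walk; None ↦ none (Option BEq matches
-- Python's None equality on this data).
def pvAny4W2 : List (Option String) → Bool
  | a :: b :: c :: d :: rest =>
      (a != b && b == c && c != d) || pvAny4W2 (b :: c :: d :: rest)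
  | _ => false

def pvAny5W3 : List (Option String) → Bool
  | a :: b :: c :: d :: e :: rest =>
      (a != b && b == c && c == d && d != e) || pvAny5W3 (b :: c :: d :: e :: rest)
  | _ => false

def get_pair_and_triplet_found_flags_alt (sorted_letters : List String) : Bool × Bool :=
  let ext : List (Option String) := none :: sorted_letters.map some ++ [none]
  (pvAny4W2 ext, pvAny5W3 ext)

-- ===== PRECONDITION & SPEC =====
def Spec_get_pair_and_triplet_found_flags (sorted_letters : List String) (out : Bool × Bool) : Prop := out = get_pair_and_triplet_found_flags_alt sorted_letters
instance (sorted_letters : List String) (out : Bool × Bool) : Decidable (Spec_get_pair_and_triplet_found_flags sorted_letters out) := by unfold Spec_get_pair_and_triplet_found_flags; infer_instance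

-- ===== CLAIM (what is proved, stated in full; the proofs are below) =====
def Claim_equal_get_pair_and_triplet_found_flags : Prop := ∀ (sorted_letters : List String), Dom_get_pair_and_triplet_found_flags sorted_letters → Spec_get_pair_and_triplet_found_flags sorted_letters (get_pair_and_triplet_found_flags sorted_letters)

-- ===== LEMMAS AND PROOFS =====

-- Abstract run-length list: the runs of xs given that a run of prev of length n is open.
def pvRuns (prev : String) (n : Int) : List String → List Int
  | [] => [n]
  | y :: rest => if y == prev then pvRuns prev (n + 1) rest else n :: pvRuns y 1 rest

-- Run lengths visible from a suffix whose previous element is a (the run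
-- containing a, if any, is hidden: its start lies before the suffix).
def pvVis : Option String → List String → List Int
  | _, [] => []
  | a, y :: t => if some y == a then pvVis a t else pvRuns y 1 t

theorem pvRuns_cons_le (v : List String) (y : String) (n : Int) :
    ∃ h t, pvRuns y n v = h :: t ∧ n ≤ h := by
  induction v generalizing n with
  | nil => exact ⟨n, [], rfl, le_rfl⟩
  | cons z u ih =>
    by_cases hz : z = y
    · obtain ⟨h, t, he, hle⟩ := ih (n + 1)
      exact ⟨h, t, by simp [pvRuns, hz, he], by omega⟩
    · exact ⟨n, pvRuns z 1 u, by simp [pvRuns, hz], le_rfl⟩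

theorem pvVis_eq_tail (v : List String) (y : String) (n : Int) :
    pvVis (some y) v = (pvRuns y n v).tail := by
  induction v generalizing n with
  | nil => simp [pvVis, pvRuns]
  | cons z u ih =>
    by_cases hz : z = y
    · simp [pvVis, pvRuns, hz, ih (n + 1)]
    · simp [pvVis, pvRuns, hz]

theorem pvBLoop_runs_A (xs : List String) (pair triplet : Bool) (n : Int) (prev : String)
    (h : 1 ≤ n) :
    pvALoop xs pair triplet n prev
      = (pair || (pvRuns prev n xs).contains 2, triplet || (pvRuns prev n xs).contains 3) := by
  induction xs generalizing pair triplet n prev with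
  | nil =>
    simp only [pvALoop, pvRuns, List.contains_cons, List.contains_nil, Bool.or_false]
    by_cases h2 : n = 2
    · simp [h2]
    · by_cases h3 : n = 3
      · simp [h3]
      · have e2 : ((2 : Int) == n) = false := by simp; omega
        have e3 : ((3 : Int) == n) = false := by simp; omega
        simp [(by simp; omega : (n == 2) = false), (by simp; omega : (n == 3) = false), e2, e3]
  | cons y rest ih =>
    simp only [pvALoop, pvRuns]
    by_cases hy : y == prev
    · rw [eq_of_beq hy]
      rw [if_pos (by simp), if_pos (by simp)]
      exact ih _ _ _ _ (by omega)
    · rw [if_neg hy, if_neg hy, ih _ _ _ _ le_rfl]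
      simp only [List.contains_cons]
      by_cases h2 : n = 2
      · subst h2
        cases triplet <;> cases pair <;> simp
      · by_cases h3 : n = 3
        · subst h3
          cases triplet <;> cases pair <;> simp
        · have e2 : ((2 : Int) == n) = false := by simp; omega
          have e3 : ((3 : Int) == n) = false := by simp; omega
          have f2 : (n == 2) = false := by simp; omega
          have f3 : (n == 3) = false := by simp; omega
          simp [e2, e3, f2, f3]
          cases pair <;> cases triplet <;> simp

theorem pvK2 (xs : List String) : ∀ (a : Option String),
    pvAny4W2 (a :: (xs.map some ++ [none])) = (pvVis a xs).contains 2 := by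
  induction xs with
  | nil => intro a; simp [pvAny4W2, pvVis]
  | cons y t ih =>
    intro a
    cases t with
    | nil =>
      by_cases ha : some y = a <;> simp [pvAny4W2, pvVis, pvRuns, ha]
    | cons z u =>
      cases u with
      | nil =>
        by_cases ha : some y = a
        · by_cases hz : z = y <;> simp [pvAny4W2, pvVis, pvRuns, ha, hz]
        · have ha' : a ≠ some y := fun h => ha h.symm
          by_cases hz : z = y
          · simp [pvAny4W2, pvVis, pvRuns, ha, ha', hz]
          · have hz' : y ≠ z := fun h => hz h.symm
            simp [pvAny4W2, pvVis, pvRuns, ha, ha', hz, hz']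
      | cons w v =>
        have iht := ih (some y)
        simp only [List.map_cons, List.cons_append] at iht ⊢
        simp only [pvAny4W2, iht]
        by_cases ha : some y = a
        · simp [pvVis, ha]
        · have ha' : a ≠ some y := fun h => ha h.symm
          by_cases hz : z = y
          · by_cases hw : w = y
            · obtain ⟨h, tl, he, hle⟩ := pvRuns_cons_le v y 3
              have hv := pvVis_eq_tail v y 3
              have h2 : ¬((2 : Int) = h) := by omega
              simp [pvVis, pvRuns, ha, hz, hw, hv, he, h2]
            · have hw' : y ≠ w := fun h => hw h.symm
              simp [pvVis, pvRuns, ha, ha', hz, hw, hw']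
          · have hz' : y ≠ z := fun h => hz h.symm
            simp [pvVis, pvRuns, ha, ha', hz, hz']

theorem pvK3 (xs : List String) : ∀ (a : Option String),
    pvAny5W3 (a :: (xs.map some ++ [none])) = (pvVis a xs).contains 3 := by
  induction xs with
  | nil => intro a; simp [pvAny5W3, pvVis]
  | cons y t ih =>
    intro a
    cases t with
    | nil =>
      by_cases ha : some y = a <;> simp [pvAny5W3, pvVis, pvRuns, ha]
    | cons z u =>
      cases u with
      | nil =>
        by_cases ha : some y = a
        · by_cases hz : z = y <;> simp [pvAny5W3, pvVis, pvRuns, ha, hz]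
        · have ha' : a ≠ some y := fun h => ha h.symm
          by_cases hz : z = y
          · simp [pvAny5W3, pvVis, pvRuns, ha, hz]
          · have hz' : y ≠ z := fun h => hz h.symm
            simp [pvAny5W3, pvVis, pvRuns, ha, hz]
      | cons w v =>
        cases v with
        | nil =>
          by_cases ha : some y = a
          · subst ha
            by_cases hz : z = y
            · by_cases hw : w = y <;> simp [pvAny5W3, pvVis, pvRuns, hz, hw]
            · have hz' : y ≠ z := fun h => hz h.symm
              by_cases hwz : w = z <;> simp [pvAny5W3, pvVis, pvRuns, hz, hwz]
          · have ha' : a ≠ some y := fun h => ha h.symm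
            by_cases hz : z = y
            · by_cases hw : w = y
              · simp [pvAny5W3, pvVis, pvRuns, ha, ha', hz, hw]
              · have hw' : y ≠ w := fun h => hw h.symm
                simp [pvAny5W3, pvVis, pvRuns, ha, ha', hz, hw, hw']
            · have hz' : y ≠ z := fun h => hz h.symm
              by_cases hwz : w = z <;> simp [pvAny5W3, pvVis, pvRuns, ha, ha', hz, hz', hwz]
        | cons q r =>
          have iht := ih (some y)
          simp only [List.map_cons, List.cons_append] at iht ⊢
          simp only [pvAny5W3, iht]
          by_cases ha : some y = a
          · simp [pvVis, ha]
          · have ha' : a ≠ some y := fun h => ha h.symm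
            by_cases hz : z = y
            · by_cases hw : w = y
              · by_cases hq : q = y
                · obtain ⟨h, tl, he, hle⟩ := pvRuns_cons_le r y 4
                  have hv := pvVis_eq_tail r y 4
                  have h3 : ¬((3 : Int) = h) := by omega
                  simp [pvVis, pvRuns, ha, hz, hw, hq, hv, he, h3]
                · have hq' : y ≠ q := fun h => hq h.symm
                  simp [pvVis, pvRuns, ha, ha', hz, hw, hq, hq']
              · have hw' : y ≠ w := fun h => hw h.symm
                by_cases hqw : q = w <;> simp [pvVis, pvRuns, ha, ha', hz, hw, hw', hqw]
            · have hz' : y ≠ z := fun h => hz h.symm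
              simp [pvVis, pvRuns, ha, ha', hz, hz']

-- ===== VERDICT (by name: the statement is the Claim_ definition above) =====
theorem get_pair_and_triplet_found_flags_spec : Claim_equal_get_pair_and_triplet_found_flags := by
  intro xs _
  unfold Spec_get_pair_and_triplet_found_flags get_pair_and_triplet_found_flags get_pair_and_triplet_found_flags_alt
  cases xs with
  | nil => decide
  | cons x rest =>
    have hA : pvALoop (x :: rest) false false 0 "" = pvALoop rest false false 1 x := by
      simp only [pvALoop]
      by_cases hx : x == "" <;> simp [hx]
    have h2 := pvK2 (x :: rest) none
    have h3 := pvK3 (x :: rest) none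
    simp only [pvVis] at h2 h3
    rw [hA, pvBLoop_runs_A rest false false 1 x le_rfl]
    simp only [List.map_cons, List.cons_append] at h2 h3
    simp [h2, h3]
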